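-- pv_equiv track=rewrite | github.com/aptxj/Codewars | 6kyu_Fold_an_array.py | fold_array
-- ===== SOURCE A (Python) =====
-- def fold_array(array, runs):
--     a = array[:]
--     for n in range(runs):
--         l = len(a) // 2
--         r = len(a) % 2
--         for i in range(l):
--             a[i] = a[i] + a[len(a) - i - 1]
--         a = a[:l + r]
--     return a
-- ===== SOURCE B (Python) =====
-- def fold_array(array, runs):
--     # Destination-mapping scatter: precompute the sequence of lengths the array
--     # passes through (at most log2(n) rounds matter, since a length-<=1 array is
--     # a fixed point), then route every original element straight to its final
--     # slot and add it there in one pass.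
--     lens = []
--     k = len(array)
--     r = runs
--     while r > 0 and k > 1:
--         lens.append(k)
--         k -= k // 2
--         r -= 1
--     result = [0] * k
--     i = 0
--     for x in array:
--         pos = i
--         for n in lens:
--             if pos >= n // 2:
--                 pos = n - 1 - pos
--         result[pos] += x
--         i += 1
--     return result
-- ===== Notes on version B (the rewrite author's own statement) =====
-- stated objective: alternative
-- what changed: Instead of repeatedly rewriting the array round by round, B precomputes the list of intermediate lengths (stopping once the length drops to 1), computes each original element's final slot by composing the per-round index reflections, and scatter-adds every element into a zero-initialized result in a single pass.
import Mathlib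
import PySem

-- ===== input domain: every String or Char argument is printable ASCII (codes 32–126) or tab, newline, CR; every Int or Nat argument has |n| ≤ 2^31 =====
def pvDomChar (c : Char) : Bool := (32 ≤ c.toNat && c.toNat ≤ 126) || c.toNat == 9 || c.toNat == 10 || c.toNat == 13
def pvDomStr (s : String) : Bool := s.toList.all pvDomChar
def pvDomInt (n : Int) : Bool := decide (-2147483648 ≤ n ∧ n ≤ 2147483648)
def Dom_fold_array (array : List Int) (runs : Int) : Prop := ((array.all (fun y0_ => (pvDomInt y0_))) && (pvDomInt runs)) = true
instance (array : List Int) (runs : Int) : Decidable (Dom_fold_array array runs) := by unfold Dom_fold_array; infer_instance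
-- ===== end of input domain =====

-- B replaces A's round-by-round in-place folding by a destination-mapping scatter:
-- it precomputes the intermediate lengths, maps each original index to its final slot,
-- and adds every element there in one pass.

-- ===== PORT A =====
-- one round of A's outer loop: the in-place index loop a[i] += a[len(a)-i-1], then a = a[:l + r]
-- (indices i and len(a)-i-1 are always in range, so pyGetD's default 0 is never used)
def foldRoundA (a : List Int) : List Int :=
  let l := a.length / 2
  let r := a.length % 2
  let a' := (List.range l).foldl (fun acc i =>
      acc.set i (PySem.List.pyGetD acc (i : Int) 0 +
                 PySem.List.pyGetD acc ((acc.length : Int) - (i : Int) - 1) 0)) a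
  PySem.List.slice a' none (some ((l + r : Nat) : Int))

def fold_array (array : List Int) (runs : Int) : List Int :=
  (PySem.List.pyRange 0 runs 1).foldl (fun a _ => foldRoundA a) array

-- ===== PORT B =====
-- the per-round index reflection: `if pos >= n // 2: pos = n - 1 - pos`
def destStep (pos n : Nat) : Nat := if n / 2 ≤ pos then n - 1 - pos else pos

-- the `while r > 0 and k > 1` loop collecting the intermediate lengths; returns (lens, final k)
def lensGoB : Nat → Nat → List Nat × Nat
  | k, 0 => ([], k)
  | k, r + 1 =>
    if 1 < k then
      let rest := lensGoB (k - k / 2) r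
      (k :: rest.1, rest.2)
    else ([], k)

-- `result = [0] * k`, then one pass over `array` scatter-adding each element at its final slot
def fold_array_alt (array : List Int) (runs : Int) : List Int :=
  let lk := lensGoB array.length runs.toNat
  (array.foldl (fun (st : List Int × Nat) x =>
      let pos := lk.1.foldl destStep st.2
      (st.1.set pos (st.1.getD pos 0 + x), st.2 + 1))
    (List.replicate lk.2 0, 0)).1

-- ===== PRECONDITION & SPEC =====
def Spec_fold_array (array : List Int) (runs : Int) (out : List Int) : Prop := out = fold_array_alt array runs
instance (array : List Int) (runs : Int) (out : List Int) : Decidable (Spec_fold_array array runs out) := by unfold Spec_fold_array; infer_instance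

-- ===== CLAIM (what is proved, stated in full; the proofs are below) =====
def Claim_equal_fold_array : Prop := ∀ (array : List Int) (runs : Int), Dom_fold_array array runs → Spec_fold_array array runs (fold_array array runs)

-- ===== LEMMAS AND PROOFS =====

-- ---- A-side: one round of A is a functional mirror-fold ----

-- one functional round: first half zipped with the reverse, plus the odd middle slot
def oneFold (a : List Int) : List Int :=
  List.zipWith (· + ·) (a.take (a.length / 2)) a.reverse ++
    (a.drop (a.length / 2)).take (a.length % 2)

-- state of A's inner loop after the first k iterations
def foldState (a : List Int) (k : Nat) : List Int :=
  List.zipWith (· + ·) (a.take k) a.reverse ++ a.drop k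

lemma length_foldState (a : List Int) (k : Nat) (hk : k ≤ a.length) :
    (foldState a k).length = a.length := by
  simp [foldState]; omega

lemma getElem_foldState (a : List Int) (k j : Nat) (hk : k ≤ a.length) (hj : j < a.length)
    (hj' : j < (foldState a k).length) :
    (foldState a k)[j] = if _h : j < k then a[j] + a.reverse[j]'(by simpa using hj) else a[j] := by
  unfold foldState
  by_cases h : j < k
  · rw [List.getElem_append_left (by simp; omega)]
    simp [h, List.getElem_take]
  · rw [List.getElem_append_right (by simp; omega), dif_neg h]
    rw [List.getElem_drop]
    congr 1
    simp
    omega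

lemma foldState_step (a : List Int) (k : Nat) (hk : 2 * k < a.length) :
    (foldState a k).set k
      (PySem.List.pyGetD (foldState a k) (k : Int) 0 +
       PySem.List.pyGetD (foldState a k) (((foldState a k).length : Int) - (k : Int) - 1) 0)
    = foldState a (k + 1) := by
  have hk1 : k < a.length := by omega
  have hlen : (foldState a k).length = a.length := length_foldState a k (by omega)
  have hg1 : PySem.List.pyGetD (foldState a k) (k : Int) 0 = a[k] := by
    rw [PySem.List.pyGetD_natCast, List.getD_eq_getElem _ _ (by omega),
        getElem_foldState a k k (by omega) (by omega), dif_neg (lt_irrefl k)]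
  have hidx : ((foldState a k).length : Int) - (k : Int) - 1 = ((a.length - 1 - k : Nat) : Int) := by
    rw [hlen]; omega
  have hg2 : PySem.List.pyGetD (foldState a k) (((foldState a k).length : Int) - (k : Int) - 1) 0
      = a[a.length - 1 - k]'(by omega) := by
    rw [hidx, PySem.List.pyGetD_natCast, List.getD_eq_getElem _ _ (by omega),
        getElem_foldState a k _ (by omega) (by omega), dif_neg (by omega)]
  rw [hg1, hg2]
  apply List.ext_getElem
  · simp [length_foldState a (k+1) (by omega), hlen]
  · intro j hj hj2
    have hja : j < a.length := by simp [hlen] at hj; exact hj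
    rw [List.getElem_set, getElem_foldState a (k+1) j (by omega) (by simp at hj ⊢; omega)]
    by_cases hjk : j = k
    · subst hjk
      rw [if_pos rfl, dif_pos (by omega), List.getElem_reverse]
    · rw [if_neg (fun h => hjk h.symm), getElem_foldState a k j (by omega) (by omega) (by omega)]
      by_cases hlt : j < k
      · rw [dif_pos hlt, dif_pos (by omega)]
      · rw [dif_neg hlt, dif_neg (by omega)]

lemma inner_loop_eq (a : List Int) :
    (List.range (a.length / 2)).foldl (fun acc i =>
      acc.set i (PySem.List.pyGetD acc (i : Int) 0 +
                 PySem.List.pyGetD acc ((acc.length : Int) - (i : Int) - 1) 0)) a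
    = foldState a (a.length / 2) := by
  have key : ∀ (m k : Nat), k + m = a.length / 2 →
      (List.range' k m).foldl (fun acc i =>
        acc.set i (PySem.List.pyGetD acc (i : Int) 0 +
                   PySem.List.pyGetD acc ((acc.length : Int) - (i : Int) - 1) 0)) (foldState a k)
      = foldState a (a.length / 2) := by
    intro m
    induction m with
    | zero => intro k hk; simp at hk; rw [hk]; simp
    | succ m ih =>
      intro k hk
      rw [List.range'_succ, List.foldl_cons, foldState_step a k (by omega)]
      exact ih (k + 1) (by omega)
  have h0 : foldState a 0 = a := by simp [foldState]
  calc (List.range (a.length / 2)).foldl _ a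
      = (List.range' 0 (a.length / 2)).foldl (fun acc i =>
        acc.set i (PySem.List.pyGetD acc (i : Int) 0 +
                   PySem.List.pyGetD acc ((acc.length : Int) - (i : Int) - 1) 0)) (foldState a 0) := by
        rw [List.range_eq_range', h0]
    _ = foldState a (a.length / 2) := key (a.length / 2) 0 (by omega)

lemma roundA_eq_oneFold (a : List Int) : foldRoundA a = oneFold a := by
  simp only [foldRoundA, oneFold]
  rw [inner_loop_eq, PySem.List.slice_to_natCast]
  unfold foldState
  have hlen : (List.zipWith (· + ·) (a.take (a.length / 2)) a.reverse).length
      = a.length / 2 := by simp; omega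
  rw [show a.length / 2 + a.length % 2
        = (List.zipWith (· + ·) (a.take (a.length / 2)) a.reverse).length + a.length % 2
      from by rw [hlen]]
  rw [List.take_append]
  congr 1
  · exact List.take_of_length_le (by omega)
  · congr 1
    omega

-- A's outer loop as iteration of oneFold
def iterA : List Int → Nat → List Int
  | a, 0 => a
  | a, k + 1 => iterA (oneFold a) k

lemma fold_array_eq_iterA (array : List Int) (runs : Int) :
    fold_array array runs = iterA array runs.toNat := by
  unfold fold_array
  have key : ∀ (lst : List Int) (a : List Int),
      lst.foldl (fun a _ => foldRoundA a) a = iterA a lst.length := by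
    intro lst
    induction lst with
    | nil => intro a; simp [iterA]
    | cons x xs ih => intro a; rw [List.foldl_cons, roundA_eq_oneFold, ih]; rfl
  rw [key, PySem.List.length_pyRange_one]
  norm_num

-- ---- basic facts about oneFold ----

lemma length_oneFold (a : List Int) : (oneFold a).length = a.length - a.length / 2 := by
  simp [oneFold]; omega

lemma oneFold_id (a : List Int) (h : a.length ≤ 1) : oneFold a = a := by
  match a, h with
  | [], _ => rfl
  | [x], _ => simp [oneFold]

-- ---- the length chain and the destination map ----

def applyListF : List Nat → List Int → List Int
  | [], a => a
  | _ :: L, a => applyListF L (oneFold a)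

def ChainFrom : Nat → List Nat → Prop
  | _, [] => True
  | n, m :: L => m = n ∧ ChainFrom (n - n / 2) L

def finalOf : Nat → List Nat → Nat
  | k, [] => k
  | k, _ :: L => finalOf (k - k / 2) L

lemma lensGoB_chain (k f : Nat) : ChainFrom k (lensGoB k f).1 := by
  induction f generalizing k with
  | zero => trivial
  | succ f ih =>
    simp only [lensGoB]
    split
    · exact ⟨rfl, ih _⟩
    · trivial

lemma lensGoB_snd (k f : Nat) : (lensGoB k f).2 = finalOf k (lensGoB k f).1 := by
  induction f generalizing k with
  | zero => rfl
  | succ f ih =>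
    simp only [lensGoB]
    split
    · exact ih _
    · rfl

lemma iterA_eq_applyListF (f : Nat) (a : List Int) :
    iterA a f = applyListF (lensGoB a.length f).1 a := by
  induction f generalizing a with
  | zero => rfl
  | succ f ih =>
    by_cases h : 1 < a.length
    · simp only [lensGoB, if_pos h, iterA]
      rw [ih (oneFold a), length_oneFold]
      rfl
    · simp only [lensGoB, if_neg h, applyListF, iterA]
      rw [oneFold_id a (by omega), ih a]
      have : (lensGoB a.length f).1 = [] := by
        cases f with
        | zero => rfl
        | succ f => simp [lensGoB, if_neg h]
      rw [this]; rfl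

lemma length_applyListF (L : List Nat) (a : List Int) :
    (applyListF L a).length = finalOf a.length L := by
  induction L generalizing a with
  | nil => rfl
  | cons m L ih =>
    simp only [applyListF, finalOf]
    rw [ih, length_oneFold]

lemma destStep_lt (i n : Nat) (h : i < n) : destStep i n < n - n / 2 := by
  unfold destStep; split_ifs <;> omega

lemma destAll_lt (L : List Nat) (k : Nat) (hc : ChainFrom k L) (i : Nat) (hi : i < k) :
    L.foldl destStep i < finalOf k L := by
  induction L generalizing k i with
  | nil => exact hi
  | cons m L ih =>
    obtain ⟨rfl, hc'⟩ := hc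
    exact ih _ hc' _ (destStep_lt i m hi)

-- ---- fiber sums ----

def fiberSum (a : List Int) (L : List Nat) (j : Nat) : Int :=
  ((Finset.range a.length).filter (fun i => L.foldl destStep i = j)).sum (fun i => a.getD i 0)

lemma oneFold_get (a : List Int) (j : Nat) (hj : j < a.length - a.length / 2) :
    (oneFold a).getD j 0 =
      ((Finset.range a.length).filter (fun i => destStep i a.length = j)).sum
        (fun i => a.getD i 0) := by
  have hlz : (List.zipWith (· + ·) (a.take (a.length / 2)) a.reverse).length
      = a.length / 2 := by simp; omega
  have hlen : (oneFold a).length = a.length - a.length / 2 := length_oneFold a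
  rw [List.getD_eq_getElem _ _ (by omega)]
  by_cases hcase : j < a.length / 2
  · have hset : (Finset.range a.length).filter (fun i => destStep i a.length = j)
        = insert j {a.length - 1 - j} := by
      ext i
      simp only [Finset.mem_filter, Finset.mem_range, Finset.mem_insert, Finset.mem_singleton,
        destStep]
      by_cases hi : a.length / 2 ≤ i
      · simp only [if_pos hi]; omega
      · simp only [if_neg hi]; omega
    rw [hset, Finset.sum_insert (by simp; omega), Finset.sum_singleton]
    unfold oneFold
    rw [List.getElem_append_left (by omega)]
    rw [List.getElem_zipWith, List.getElem_take, List.getElem_reverse]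
    rw [List.getD_eq_getElem _ _ (by omega), List.getD_eq_getElem _ _ (by omega)]
  · have hodd : a.length % 2 = 1 ∧ j = a.length / 2 := by omega
    have hset : (Finset.range a.length).filter (fun i => destStep i a.length = j)
        = {j} := by
      ext i
      simp only [Finset.mem_filter, Finset.mem_range, Finset.mem_singleton, destStep]
      by_cases hi : a.length / 2 ≤ i
      · simp only [if_pos hi]; omega
      · simp only [if_neg hi]; omega
    rw [hset, Finset.sum_singleton]
    unfold oneFold
    rw [List.getElem_append_right (by omega)]
    rw [List.getElem_take, List.getElem_drop]
    rw [List.getD_eq_getElem _ _ (by omega)]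
    congr 1
    omega

lemma applyListF_get (L : List Nat) (a : List Int) (hc : ChainFrom a.length L)
    (j : Nat) (hj : j < finalOf a.length L) :
    (applyListF L a).getD j 0 = fiberSum a L j := by
  induction L generalizing a with
  | nil =>
    simp only [applyListF, fiberSum, List.foldl_nil, finalOf] at *
    rw [Finset.filter_eq', if_pos (Finset.mem_range.mpr hj), Finset.sum_singleton]
  | cons m L ih =>
    obtain ⟨rfl, hc'⟩ := hc
    have hlen : (oneFold a).length = a.length - a.length / 2 := length_oneFold a
    have hj' : j < finalOf (oneFold a).length L := by rw [hlen]; exact hj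
    have hstep := ih (oneFold a) (by rw [hlen]; exact hc') hj'
    rw [applyListF, hstep]
    unfold fiberSum
    rw [hlen]
    -- Fubini over the fibers of destStep · a.length
    have hmaps : ∀ x ∈ (Finset.range a.length).filter
        (fun i => List.foldl destStep (destStep i a.length) L = j),
        destStep x a.length ∈ (Finset.range (a.length - a.length / 2)).filter
          (fun i' => List.foldl destStep i' L = j) := by
      intro x hx
      simp only [Finset.mem_filter, Finset.mem_range] at hx ⊢
      refine ⟨?_, hx.2⟩
      unfold destStep
      split_ifs <;> omega
    calc ((Finset.range (a.length - a.length / 2)).filter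
            (fun i' => List.foldl destStep i' L = j)).sum (fun i' => (oneFold a).getD i' 0)
        = ((Finset.range (a.length - a.length / 2)).filter
            (fun i' => List.foldl destStep i' L = j)).sum (fun i' =>
              ((Finset.range a.length).filter (fun i => destStep i a.length = i')).sum
                (fun i => a.getD i 0)) := by
          refine Finset.sum_congr rfl ?_
          intro i' hi'
          simp only [Finset.mem_filter, Finset.mem_range] at hi'
          exact oneFold_get a i' hi'.1
      _ = ((Finset.range (a.length - a.length / 2)).filter
            (fun i' => List.foldl destStep i' L = j)).sum (fun i' =>
              (((Finset.range a.length).filter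
                  (fun i => List.foldl destStep (destStep i a.length) L = j)).filter
                (fun i => destStep i a.length = i')).sum (fun i => a.getD i 0)) := by
          refine Finset.sum_congr rfl ?_
          intro i' hi'
          simp only [Finset.mem_filter, Finset.mem_range] at hi'
          congr 1
          ext i
          simp only [Finset.mem_filter, Finset.mem_range]
          constructor
          · rintro ⟨hi, hd⟩
            exact ⟨⟨hi, by rw [hd]; exact hi'.2⟩, hd⟩
          · rintro ⟨⟨hi, _⟩, hd⟩
            exact ⟨hi, hd⟩
      _ = ((Finset.range a.length).filter
            (fun i => List.foldl destStep (destStep i a.length) L = j)).sum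
              (fun i => a.getD i 0) :=
          Finset.sum_fiberwise_of_maps_to hmaps _
      _ = ((Finset.range a.length).filter
            (fun i => List.foldl destStep i (a.length :: L) = j)).sum
              (fun i => a.getD i 0) := rfl

-- ---- B-side scatter characterization ----

-- per-element contribution of the scattered suffix, counter starting at c
def sShift (L : List Nat) : List Int → Nat → Nat → Int
  | [], _, _ => 0
  | x :: xs, c, j => (if L.foldl destStep c = j then x else 0) + sShift L xs (c + 1) j

lemma getD_set_lt {l : List Int} {p j : Nat} {v : Int} (hp : p < l.length) :
    (l.set p v).getD j 0 = if p = j then v else l.getD j 0 := by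
  by_cases h : p = j
  · subst h
    rw [if_pos rfl, List.getD_eq_getElem _ _ (by simpa using hp), List.getElem_set_self]
  · rw [if_neg h]
    by_cases hj : j < l.length
    · rw [List.getD_eq_getElem _ _ (by simpa using hj), List.getD_eq_getElem _ _ hj,
          List.getElem_set_ne h]
    · rw [List.getD_eq_default _ _ (by simpa using hj), List.getD_eq_default _ _ (by omega)]

lemma scatter_len (L : List Nat) (xs : List Int) (res : List Int) (c : Nat) :
    ((xs.foldl (fun (st : List Int × Nat) x =>
        (st.1.set (L.foldl destStep st.2) (st.1.getD (L.foldl destStep st.2) 0 + x), st.2 + 1))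
      (res, c)).1).length = res.length := by
  induction xs generalizing res c with
  | nil => rfl
  | cons x xs ih => rw [List.foldl_cons, ih, List.length_set]

lemma scatter_getD (L : List Nat) (xs : List Int) (res : List Int) (c j : Nat)
    (h : ∀ t, t < xs.length → L.foldl destStep (c + t) < res.length) :
    ((xs.foldl (fun (st : List Int × Nat) x =>
        (st.1.set (L.foldl destStep st.2) (st.1.getD (L.foldl destStep st.2) 0 + x), st.2 + 1))
      (res, c)).1).getD j 0 = res.getD j 0 + sShift L xs c j := by
  induction xs generalizing res c with
  | nil => simp [sShift]
  | cons x xs ih =>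
    rw [List.foldl_cons]
    have hp : L.foldl destStep c < res.length := by
      have := h 0 (by simp); simpa using this
    have h' : ∀ t, t < xs.length →
        L.foldl destStep (c + 1 + t) <
          (res.set (L.foldl destStep c) (res.getD (L.foldl destStep c) 0 + x)).length := by
      intro t ht
      rw [List.length_set]
      have := h (t + 1) (by simpa using Nat.succ_lt_succ ht)
      have e : c + (t + 1) = c + 1 + t := by omega
      rwa [e] at this
    rw [ih _ _ h', getD_set_lt hp, sShift]
    by_cases hpj : L.foldl destStep c = j
    · rw [if_pos hpj, if_pos hpj, hpj]; ring
    · rw [if_neg hpj, if_neg hpj]; ring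

lemma sShift_eq_sum (L : List Nat) (xs : List Int) (c j : Nat) :
    sShift L xs c j =
      ((Finset.range xs.length).filter (fun i => L.foldl destStep (c + i) = j)).sum
        (fun i => xs.getD i 0) := by
  induction xs generalizing c with
  | nil => simp [sShift]
  | cons x xs ih =>
    rw [sShift, ih (c + 1), Finset.sum_filter, Finset.sum_filter, List.length_cons,
        Finset.sum_range_succ'
          (fun i => if L.foldl destStep (c + i) = j then (x :: xs).getD i 0 else 0)]
    rw [add_comm]
    congr 1
    · refine Finset.sum_congr rfl ?_
      intro i _
      have e : c + (i + 1) = c + 1 + i := by omega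
      rw [e]
      rfl

lemma scatter_eq (array : List Int) (runs : Int) :
    fold_array_alt array runs = applyListF (lensGoB array.length runs.toNat).1 array := by
  have hchain := lensGoB_chain array.length runs.toNat
  have hK := lensGoB_snd array.length runs.toNat
  have hdest : ∀ i, i < array.length →
      (lensGoB array.length runs.toNat).1.foldl destStep i
        < (lensGoB array.length runs.toNat).2 := by
    intro i hi
    rw [hK]
    exact destAll_lt _ _ hchain i hi
  simp only [fold_array_alt]
  apply List.ext_getElem
  · rw [scatter_len, List.length_replicate, length_applyListF, ← hK]
  · intro j h1 h2
    have hjK : j < (lensGoB array.length runs.toNat).2 := by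
      rwa [scatter_len, List.length_replicate] at h1
    have hL : ((array.foldl (fun (st : List Int × Nat) x =>
        (st.1.set ((lensGoB array.length runs.toNat).1.foldl destStep st.2)
          (st.1.getD ((lensGoB array.length runs.toNat).1.foldl destStep st.2) 0 + x),
         st.2 + 1))
        (List.replicate (lensGoB array.length runs.toNat).2 0, 0)).1).getD j 0
        = fiberSum array (lensGoB array.length runs.toNat).1 j := by
      rw [scatter_getD _ _ _ _ _ (by
        intro t ht
        rw [List.length_replicate]
        simpa using hdest t ht)]
      rw [sShift_eq_sum]
      have hz : (List.replicate (lensGoB array.length runs.toNat).2 (0 : Int)).getD j 0 = 0 := by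
        rw [List.getD_eq_getElem _ _ (by simpa using hjK), List.getElem_replicate]
      rw [hz, zero_add]
      unfold fiberSum
      simp only [Nat.zero_add]
    have hR : (applyListF (lensGoB array.length runs.toNat).1 array).getD j 0
        = fiberSum array (lensGoB array.length runs.toNat).1 j :=
      applyListF_get _ _ hchain j (by rw [← hK]; exact hjK)
    rw [← List.getD_eq_getElem _ 0 h1, ← List.getD_eq_getElem _ 0 h2, hL, hR]

-- ===== VERDICT (by name: the statement is the Claim_ definition above) =====
theorem fold_array_spec : Claim_equal_fold_array := by
  intro array runs _
  unfold Spec_fold_array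
  rw [fold_array_eq_iterA, iterA_eq_applyListF, scatter_eq]
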